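-- pv_equiv track=rewrite | github.com/YellowSub17/aoc | 2015/1/santas_elevator.py | count_levels
-- ===== SOURCE A (Python) =====
-- def count_levels(inst, find_basement=False ):
--     count = 0
--     for i,  level in enumerate(inst):
--         if level == '(':
--             count +=1
--         elif level == ')':
--             count -=1
--
--         if find_basement:
--             if count==-1:
--                 return i+1
--
--     return count
-- ===== SOURCE B (Python) =====
-- def count_levels(inst, find_basement=False):
--     # table of per-character deltas, then prefix sums
--     deltas = [1 if c == '(' else (-1 if c == ')' else 0) for c in inst]
--     if find_basement:
--         prefix = []
--         s = 0
--         for d in deltas: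
--             s += d
--             prefix.append(s)
--         for i, p in enumerate(prefix):
--             if p == -1:
--                 return i + 1
--         return s
--     return sum(deltas)
-- ===== Notes on version B (the rewrite author's own statement) =====
-- stated objective: alternative
-- what changed: Replaces A's single fused running-count loop with a per-character delta table: the basement case builds a prefix-sum table and searches it for the first -1, the non-basement case is just the sum of the deltas.
import Mathlib
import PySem

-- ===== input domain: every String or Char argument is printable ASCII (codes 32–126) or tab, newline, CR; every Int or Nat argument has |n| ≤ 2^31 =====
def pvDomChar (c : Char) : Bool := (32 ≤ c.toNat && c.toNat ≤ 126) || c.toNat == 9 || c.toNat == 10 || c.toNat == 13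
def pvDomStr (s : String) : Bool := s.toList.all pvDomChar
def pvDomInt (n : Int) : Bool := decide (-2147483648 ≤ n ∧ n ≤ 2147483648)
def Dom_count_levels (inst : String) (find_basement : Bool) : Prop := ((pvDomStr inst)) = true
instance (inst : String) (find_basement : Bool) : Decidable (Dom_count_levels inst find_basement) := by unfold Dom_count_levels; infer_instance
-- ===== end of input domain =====

-- B replaces A's fused running-count loop with a delta table + prefix-sum search (basement) / plain sum; same cost, different decomposition.
-- ===== PORT A =====
-- A's for-loop over enumerate(inst) with early return, as structural recursion on the chars
def countLoopA (cs : List Char) (i : Int) (count : Int) (fb : Bool) : Int :=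
  match cs with
  | [] => count
  | c :: rest =>
    let count' := if c = '(' then count + 1 else if c = ')' then count - 1 else count
    if fb ∧ count' = -1 then i + 1 else countLoopA rest (i + 1) count' fb

def count_levels (inst : String) (find_basement : Bool) : Int :=
  countLoopA inst.toList 0 0 find_basement

-- ===== PORT B =====
def deltaB (c : Char) : Int := if c = '(' then 1 else if c = ')' then -1 else 0

-- Source B's prefix-building loop: returns (prefix list, final running sum s)
def buildPrefixB : List Int → Int → List Int × Int
  | [], s => ([], s)
  | d :: ds, s =>
    let r := buildPrefixB ds (s + d)
    ((s + d) :: r.1, r.2)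

-- Source B's enumerate-search for the first prefix equal to -1
def searchB : List Int → Int → Option Int
  | [], _ => none
  | p :: ps, i => if p = -1 then some (i + 1) else searchB ps (i + 1)

def count_levels_alt (inst : String) (find_basement : Bool) : Int :=
  let deltas := inst.toList.map deltaB
  if find_basement then
    let pr := buildPrefixB deltas 0
    match searchB pr.1 0 with
    | some r => r
    | none => pr.2
  else deltas.foldl (· + ·) 0

-- ===== PRECONDITION & SPEC =====
def Spec_count_levels (inst : String) (find_basement : Bool) (out : Int) : Prop := out = count_levels_alt inst find_basement
instance (inst : String) (find_basement : Bool) (out : Int) : Decidable (Spec_count_levels inst find_basement out) := by unfold Spec_count_levels; infer_instance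

-- ===== CLAIM (what is proved, stated in full; the proofs are below) =====
def Claim_equal_count_levels : Prop := ∀ (inst : String) (find_basement : Bool), Dom_count_levels inst find_basement → Spec_count_levels inst find_basement (count_levels inst find_basement)

-- ===== LEMMAS AND PROOFS =====
theorem foldl_add_shift (l : List Int) (a : Int) :
    l.foldl (· + ·) a = a + l.foldl (· + ·) 0 := by
  induction l generalizing a with
  | nil => simp
  | cons d ds ih => simp only [List.foldl]; rw [ih, ih (a := 0 + d)]; ring

theorem loopA_false (cs : List Char) (i count : Int) :
    countLoopA cs i count false = count + (cs.map deltaB).foldl (· + ·) 0 := by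
  induction cs generalizing i count with
  | nil => simp [countLoopA]
  | cons c rest ih =>
    have hc : (if c = '(' then count + 1 else if c = ')' then count - 1 else count)
        = count + deltaB c := by
      simp only [deltaB]; split_ifs <;> ring
    simp only [countLoopA, List.map, List.foldl, Bool.false_eq_true, false_and, if_false, hc]
    rw [ih, foldl_add_shift _ (0 + deltaB c)]
    ring

theorem loopA_true (cs : List Char) (i count : Int) :
    countLoopA cs i count true =
      (match searchB (buildPrefixB (cs.map deltaB) count).1 i with
       | some r => r
       | none => (buildPrefixB (cs.map deltaB) count).2) := by
  induction cs generalizing i count with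
  | nil => simp [countLoopA, buildPrefixB, searchB]
  | cons c rest ih =>
    have hc : (if c = '(' then count + 1 else if c = ')' then count - 1 else count)
        = count + deltaB c := by
      simp [deltaB]; split_ifs <;> ring
    simp only [countLoopA, List.map, buildPrefixB, searchB, hc]
    by_cases h : count + deltaB c = -1
    · simp [h]
    · simp [h, ih]

-- ===== VERDICT (by name: the statement is the Claim_ definition above) =====
theorem count_levels_spec : Claim_equal_count_levels := by
  intro inst fb _
  unfold Spec_count_levels count_levels count_levels_alt
  cases fb with
  | false => simpa using loopA_false inst.toList 0 0
  | true => simpa using loopA_true inst.toList 0 0
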